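-- pv_equiv track=rewrite | github.com/pattern-finder/api | heroku_deploy/api/evaluation_code/python/evalPlagiat.py | delete_string
-- ===== SOURCE A (Python) =====
-- def delete_string(ligne):
--     delete = False
--     list_chain_to_remove = []
--
--     if ligne.count("\"") > 0:
--
--         i = 0
--         chain_to_remove = ""
--
--         while i < len(ligne):
--
--             if ligne[i] == '\"':
--                 list_chain_to_remove.append(chain_to_remove)
--                 chain_to_remove = ""
--                 delete = not delete
--
--             if delete and ligne[i] != '"':
--                 chain_to_remove = chain_to_remove + ligne[i]
--
--             i += 1
--
--     for chain in list_chain_to_remove: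
--         ligne = ligne.replace(chain, "")
--
--     ligne = ligne.replace("\"\"", "\"")
--
--     return ligne
-- ===== SOURCE B (Python) =====
-- def delete_string(ligne):
--     # contents of consecutive quote pairs, left to right: split on '"' and
--     # pair up the pieces after the first; each pair is (quoted content, following text)
--     it = iter(ligne.split('"')[1:])
--     for chain, _following in zip(it, it):
--         ligne = ligne.replace(chain, "")
--     return ligne.replace('""', '"')
-- ===== Notes on version B (the rewrite author's own statement) =====
-- stated objective: simpler
-- what changed: Replaces the index while-loop with its toggle flag and manual character accumulator by one split on the quote character whose pieces after the first are paired up, reading each quoted content directly; the sequential replace loop and the final double-quote collapse stay.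
import Mathlib
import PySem

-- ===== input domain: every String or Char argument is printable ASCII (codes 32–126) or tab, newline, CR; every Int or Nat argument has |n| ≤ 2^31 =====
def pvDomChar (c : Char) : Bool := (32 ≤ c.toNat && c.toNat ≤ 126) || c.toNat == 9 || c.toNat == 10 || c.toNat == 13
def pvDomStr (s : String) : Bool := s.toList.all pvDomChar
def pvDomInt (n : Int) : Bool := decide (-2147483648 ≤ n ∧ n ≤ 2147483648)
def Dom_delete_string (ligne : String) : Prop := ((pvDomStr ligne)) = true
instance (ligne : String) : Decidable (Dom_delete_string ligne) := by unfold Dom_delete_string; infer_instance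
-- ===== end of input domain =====

-- B replaces A's index loop / toggle flag / manual accumulator by one split('"') whose
-- pieces after the first are paired up; objective: simpler (same asymptotic cost).

-- ===== PORT A =====
-- the while-loop: state (delete, chain_to_remove, list_chain_to_remove), one step per character
def pvLoopA (delete : Bool) (chain : List Char) (acc : List (List Char)) : List Char → List (List Char)
  | [] => acc
  | c :: rest =>
    if c = '"' then pvLoopA (!delete) [] (acc ++ [chain]) rest
    else if delete then pvLoopA delete (chain ++ [c]) acc rest
    else pvLoopA delete chain acc rest

def delete_string (ligne : String) : String :=
  let cs := ligne.toList
  let chains := if 0 < PySem.Chars.count cs ['"'] then pvLoopA false [] [] cs else []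
  let res := chains.foldl (fun s ch => PySem.Chars.replace s ch []) cs
  String.ofList (PySem.Chars.replace res ['"', '"'] ['"'])

-- ===== PORT B =====
-- zip(it, it) over parts[1:]: take every other piece, only while a following piece exists
def pvPairChains : List (List Char) → List (List Char)
  | a :: _ :: t => a :: pvPairChains t
  | _ => []

def delete_string_alt (ligne : String) : String :=
  let parts := PySem.Chars.splitOn ligne.toList ['"']
  let chains := pvPairChains (PySem.List.slice parts (some 1) none)
  let res := chains.foldl (fun s ch => PySem.Chars.replace s ch []) ligne.toList
  String.ofList (PySem.Chars.replace res ['"', '"'] ['"'])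

-- ===== PRECONDITION & SPEC =====
def Spec_delete_string (ligne : String) (out : String) : Prop := out = delete_string_alt ligne
instance (ligne : String) (out : String) : Decidable (Spec_delete_string ligne out) := by unfold Spec_delete_string; infer_instance

-- ===== CLAIM (what is proved, stated in full; the proofs are below) =====
def Claim_equal_delete_string : Prop := ∀ (ligne : String), Dom_delete_string ligne → Spec_delete_string ligne (delete_string ligne)

-- ===== LEMMAS AND PROOFS =====

-- structural characterisation of split-on-'"': first piece and the remaining pieces
def pvMsHead : List Char → List Char
  | [] => []
  | c :: r => if c = '"' then [] else c :: pvMsHead r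

def pvMsTail : List Char → List (List Char)
  | [] => []
  | c :: r => if c = '"' then pvMsHead r :: pvMsTail r else pvMsTail r

-- the chain list A's scan produces, as a function of the pieces after the first
def pvFA : List (List Char) → List (List Char)
  | [] => []
  | [_] => [[]]
  | a :: _ :: t => [] :: a :: pvFA t

lemma pvFA_cons (a : List Char) (t : List (List Char)) :
    pvFA (a :: t) = [] :: (if t.isEmpty then [] else a :: pvFA t.tail) := by
  cases t <;> simp [pvFA]

lemma pv_splitOn_go_eq (fuel : Nat) : ∀ (l cur : List Char) (acc : List (List Char)),
    l.length ≤ fuel →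
    PySem.Chars.splitOn.go ['"'] fuel l cur acc
      = acc.reverse ++ ((cur.reverse ++ pvMsHead l) :: pvMsTail l) := by
  induction fuel with
  | zero =>
    intro l cur acc h
    have hl : l = [] := by cases l <;> simp_all
    subst hl
    rw [PySem.Chars.splitOn.go]
    simp [pvMsHead, pvMsTail]
  | succ fuel ih =>
    intro l cur acc h
    cases l with
    | nil =>
      rw [PySem.Chars.splitOn.go]
      · simp [pvMsHead, pvMsTail]
      · omega
    | cons c rest =>
      have hrest : rest.length ≤ fuel := by simp at h; omega
      rw [PySem.Chars.splitOn.go]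
      by_cases hc : c = '"'
      · subst hc
        simp only [List.isPrefixOf, Bool.and_true, beq_self_eq_true, if_pos, List.length_cons,
          List.length_nil, Nat.zero_add, List.drop_one, List.tail_cons]
        rw [ih rest [] (cur.reverse :: acc) hrest]
        simp [pvMsHead, pvMsTail]
      · have hpre : ['"'].isPrefixOf (c :: rest) = false := by
          simp [List.isPrefixOf, Ne.symm hc]
        simp only [hpre, Bool.false_eq_true, if_false]
        rw [ih rest (c :: cur) acc hrest]
        simp [pvMsHead, pvMsTail, hc, List.append_assoc]

lemma pv_splitOn_eq (cs : List Char) :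
    PySem.Chars.splitOn cs ['"'] = pvMsHead cs :: pvMsTail cs := by
  rw [PySem.Chars.splitOn, pv_splitOn_go_eq (cs.length + 1) cs [] [] (by omega)]
  simp

lemma pv_count_go_le (fuel : Nat) : ∀ (l : List Char) (acc : Nat),
    acc ≤ PySem.Chars.count.go ['"'] fuel l acc := by
  induction fuel with
  | zero =>
    intro l acc
    cases l <;> rw [PySem.Chars.count.go]
  | succ fuel ih =>
    intro l acc
    cases l with
    | nil =>
      rw [PySem.Chars.count.go]
      · omega
    | cons c rest =>
      rw [PySem.Chars.count.go]
      split
      · exact le_trans (by omega) (ih _ (acc + 1))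
      · exact ih _ acc

lemma pv_count_go_pos (fuel : Nat) : ∀ (l : List Char) (acc : Nat),
    l.length ≤ fuel → '"' ∈ l → acc < PySem.Chars.count.go ['"'] fuel l acc := by
  induction fuel with
  | zero =>
    intro l acc h hq
    cases l with
    | nil => simp at hq
    | cons c rest => simp at h
  | succ fuel ih =>
    intro l acc h hq
    cases l with
    | nil => simp at hq
    | cons c rest =>
      have hrest : rest.length ≤ fuel := by simp at h; omega
      rw [PySem.Chars.count.go]
      by_cases hc : c = '"'
      · subst hc
        simp only [List.isPrefixOf, Bool.and_true, beq_self_eq_true, if_pos, List.length_cons,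
          List.length_nil, Nat.zero_add, List.drop_one, List.tail_cons]
        exact lt_of_lt_of_le (by omega) (pv_count_go_le fuel rest (acc + 1))
      · have hpre : ['"'].isPrefixOf (c :: rest) = false := by
          simp [List.isPrefixOf, Ne.symm hc]
        simp only [hpre, Bool.false_eq_true, if_false]
        have hq' : '"' ∈ rest := by
          cases hq with
          | head => exact absurd rfl hc
          | tail _ h' => exact h'
        exact ih rest acc hrest hq'

lemma pv_count_zero_no_quote (cs : List Char)
    (h : ¬ 0 < PySem.Chars.count cs ['"']) : '"' ∉ cs := by
  intro hq
  apply h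
  rw [PySem.Chars.count]
  simp only [List.isEmpty_cons, Bool.false_eq_true, if_false]
  exact pv_count_go_pos cs.length cs 0 (le_refl _) hq

lemma pv_msTail_nil_of_no_quote (cs : List Char) (h : '"' ∉ cs) : pvMsTail cs = [] := by
  induction cs with
  | nil => rfl
  | cons c rest ih =>
    simp only [List.mem_cons, not_or] at h
    simp [pvMsTail, Ne.symm h.1, ih h.2]

lemma pv_loopA_eq (cs : List Char) :
    (∀ acc, pvLoopA false [] acc cs = acc ++ pvFA (pvMsTail cs)) ∧
    (∀ chain acc, pvLoopA true chain acc cs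
        = acc ++ (if (pvMsTail cs).isEmpty then []
                  else (chain ++ pvMsHead cs) :: pvFA (pvMsTail cs).tail)) := by
  induction cs with
  | nil => constructor <;> intros <;> simp [pvLoopA, pvMsTail, pvFA]
  | cons c rest ih =>
    constructor
    · intro acc
      by_cases hc : c = '"'
      · subst hc
        simp only [pvLoopA, if_pos, Bool.not_false]
        rw [ih.2 [] (acc ++ [[]])]
        have ht : pvMsTail ('"' :: rest) = pvMsHead rest :: pvMsTail rest := by simp [pvMsTail]
        rw [ht, pvFA_cons]
        simp [List.append_assoc]
      · simp only [pvLoopA, hc, if_false, Bool.false_eq_true]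
        rw [ih.1 acc]
        simp [pvMsTail, hc]
    · intro chain acc
      by_cases hc : c = '"'
      · subst hc
        simp only [pvLoopA, if_pos, Bool.not_true]
        rw [ih.1 (acc ++ [chain])]
        simp [pvMsTail, pvMsHead, List.append_assoc]
      · simp only [pvLoopA, hc, if_false, if_pos]
        rw [ih.2 (chain ++ [c]) acc]
        simp [pvMsTail, pvMsHead, hc, List.append_assoc]

lemma pv_replace_nil (s : List Char) : PySem.Chars.replace s [] [] = s := by
  simp [PySem.Chars.replace]

lemma pv_fold_fA_eq (t : List (List Char)) : ∀ (s : List Char),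
    (pvFA t).foldl (fun s ch => PySem.Chars.replace s ch []) s
      = (pvPairChains t).foldl (fun s ch => PySem.Chars.replace s ch []) s := by
  induction t using pvPairChains.induct with
  | case1 a b t ih =>
    intro s
    simp [pvFA, pvPairChains, pv_replace_nil, ih]
  | case2 t h =>
    intro s
    cases t with
    | nil => simp [pvFA, pvPairChains]
    | cons a t' =>
      cases t' with
      | nil => simp [pvFA, pvPairChains, pv_replace_nil]
      | cons b t'' => exact (h a b t'' rfl).elim

-- ===== VERDICT (by name: the statement is the Claim_ definition above) =====
theorem delete_string_spec : Claim_equal_delete_string := by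
  intro ligne _
  unfold Spec_delete_string delete_string delete_string_alt
  simp only [pv_splitOn_eq, PySem.List.slice_from_one, List.tail_cons]
  by_cases h : 0 < PySem.Chars.count ligne.toList ['"']
  · simp only [h, if_pos, (pv_loopA_eq ligne.toList).1, List.nil_append, pv_fold_fA_eq]
  · have hq := pv_count_zero_no_quote ligne.toList h
    simp [h, pv_msTail_nil_of_no_quote ligne.toList hq, pvPairChains]
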